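-- pv_equiv track=rewrite | github.com/williammcintosh/WMT_excel_merger | excel_file_merger.py | update_mastersheet_material_type
-- ===== SOURCE A (Python) =====
-- def update_mastersheet_material_type(notes):
--     hazwords = ["batter", "hid", "e waste", "light", "tube", "bulb"]
--     # Default to "metal", "wood"
--     mat = "Misc."
--     if notes:
--         if "film" in notes.lower():
--             mat = "Plastics (i.e, film, rigids)"
--         elif "glass" in notes.lower():
--             mat = "Glass"
--         elif "grease" in notes.lower():
--             mat =  "Grease ORCO / PPV"
--         elif any(word in notes.lower() for word in hazwords):
--             mat = "Universal/Hazardous Waste"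
--     return "".join(mat.split()).lower()
-- ===== SOURCE B (Python) =====
-- def update_mastersheet_material_type(notes):
--     # Single left-to-right scan: at each position, check which keywords start
--     # there and keep the minimum priority; the output table holds the already
--     # whitespace-stripped, lowercased labels.
--     outputs = ["plastics(i.e,film,rigids)", "glass", "greaseorco/ppv",
--                "universal/hazardouswaste", "misc."]
--     kw = {"film": 0, "glass": 1, "grease": 2,
--           "batter": 3, "hid": 3, "e waste": 3, "light": 3, "tube": 3, "bulb": 3}
--     best = 4
--     if notes:
--         low = notes.lower()
--         for i in range(len(low)):
--             for word, prio in kw.items():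
--                 if prio < best and low.startswith(word, i):
--                     best = prio
--     return outputs[best]
-- ===== Notes on version B (the rewrite author's own statement) =====
-- stated objective: alternative
-- what changed: Replaced the if/elif cascade of whole-string substring tests (each re-lowering the notes) with one lowercasing followed by a single left-to-right scan that keeps the minimum priority of any keyword starting at each position, indexing a precomputed table of already-normalized output strings.
import Mathlib
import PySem

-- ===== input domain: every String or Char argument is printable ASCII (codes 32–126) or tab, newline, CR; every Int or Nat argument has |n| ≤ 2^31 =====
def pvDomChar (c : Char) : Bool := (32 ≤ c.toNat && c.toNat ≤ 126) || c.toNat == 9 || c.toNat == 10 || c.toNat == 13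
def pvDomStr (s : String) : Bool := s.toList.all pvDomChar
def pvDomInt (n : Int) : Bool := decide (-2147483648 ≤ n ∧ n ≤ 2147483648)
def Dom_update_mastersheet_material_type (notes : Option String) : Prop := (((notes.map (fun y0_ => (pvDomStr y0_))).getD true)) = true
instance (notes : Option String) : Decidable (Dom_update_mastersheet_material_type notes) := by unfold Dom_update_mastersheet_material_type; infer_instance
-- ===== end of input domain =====

set_option maxHeartbeats 1000000


-- B replaces A's if/elif cascade of whole-string substring tests by a single
-- left-to-right scan of the lowered text keeping the minimum priority of any keyword
-- starting at each position, then indexes a precomputed normalized-output table (alternative).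

-- ===== PORT A =====
def update_mastersheet_material_type (notes : Option String) : String :=
  let hazwords := ["batter", "hid", "e waste", "light", "tube", "bulb"]
  let mat := "Misc."
  let mat :=
    match notes with
    | none => mat
    | some n =>
      if n ≠ "" then
        if PySem.Str.isIn "film" (PySem.Str.lower n) then "Plastics (i.e, film, rigids)"
        else if PySem.Str.isIn "glass" (PySem.Str.lower n) then "Glass"
        else if PySem.Str.isIn "grease" (PySem.Str.lower n) then "Grease ORCO / PPV"
        else if hazwords.any (fun w => PySem.Str.isIn w (PySem.Str.lower n)) then "Universal/Hazardous Waste"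
        else mat
      else mat
  PySem.Str.lower (PySem.Str.join "" (PySem.Str.split₀ mat))

-- ===== PORT B =====
-- the keyword → priority table (Python dict 'kw' in insertion order)
def pvKw : List (List Char × Nat) :=
  [("film".toList, 0), ("glass".toList, 1), ("grease".toList, 2),
   ("batter".toList, 3), ("hid".toList, 3), ("e waste".toList, 3),
   ("light".toList, 3), ("tube".toList, 3), ("bulb".toList, 3)]

-- inner loop: 'for word, prio in kw.items(): if prio < best and low.startswith(word, i): best = prio'
-- (low.startswith(word, i) = word is a prefix of the suffix low[i:])
def pvStep (best : Nat) (s : List Char) : Nat :=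
  pvKw.foldl (fun b wp => if wp.2 < b ∧ wp.1.isPrefixOf s then wp.2 else b) best

-- outer loop: 'for i in range(len(low))'; position i corresponds to the suffix low.drop i
def pvScan : List Char → Nat → Nat
  | [], best => best
  | c :: rest, best => pvScan rest (pvStep best (c :: rest))

def update_mastersheet_material_type_alt (notes : Option String) : String :=
  let outputs := ["plastics(i.e,film,rigids)", "glass", "greaseorco/ppv",
                  "universal/hazardouswaste", "misc."]
  let best : Nat :=
    match notes with
    | none => 4
    | some n => if n ≠ "" then pvScan (PySem.Chars.lower n.toList) 4 else 4
  outputs.getD best ""    -- outputs[best]; best ≤ 4 always, so the index is in range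

-- ===== PRECONDITION & SPEC =====
def Spec_update_mastersheet_material_type (notes : Option String) (out : String) : Prop := out = update_mastersheet_material_type_alt notes
instance (notes : Option String) (out : String) : Decidable (Spec_update_mastersheet_material_type notes out) := by unfold Spec_update_mastersheet_material_type; infer_instance

-- ===== CLAIM =====
def Claim_equal_update_mastersheet_material_type : Prop := ∀ (notes : Option String), Dom_update_mastersheet_material_type notes → Spec_update_mastersheet_material_type notes (update_mastersheet_material_type notes)

-- ===== LEMMAS AND PROOFS =====

-- the inner fold keeps the minimum priority among matching entries (≤-characterization)
lemma pvFold_le_iff (pred : List Char → Bool) (l : List (List Char × Nat)) :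
    ∀ (best p : Nat),
      l.foldl (fun b wp => if wp.2 < b ∧ pred wp.1 then wp.2 else b) best ≤ p ↔
        best ≤ p ∨ ∃ wp ∈ l, wp.2 ≤ p ∧ pred wp.1 := by
  induction l with
  | nil => intro best p; simp
  | cons a t ih =>
    intro best p
    simp only [List.foldl_cons, ih, List.mem_cons]
    constructor
    · rintro (h | ⟨wp, hm, h1, h2⟩)
      · split_ifs at h with hc
        · exact Or.inr ⟨a, Or.inl rfl, h, hc.2⟩
        · exact Or.inl h
      · exact Or.inr ⟨wp, Or.inr hm, h1, h2⟩
    · rintro (h | ⟨wp, hm, h1, h2⟩)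
      · left; split_ifs with hc
        · exact le_trans (le_of_lt hc.1) h
        · exact h
      · rcases hm with rfl | hm
        · left; split_ifs with hc
          · exact h1
          · have : ¬ wp.2 < best := fun hlt => hc ⟨hlt, h2⟩
            omega
        · exact Or.inr ⟨wp, hm, h1, h2⟩

lemma pvStep_le_iff (best p : Nat) (s : List Char) :
    pvStep best s ≤ p ↔ best ≤ p ∨ ∃ wp ∈ pvKw, wp.2 ≤ p ∧ wp.1.isPrefixOf s :=
  pvFold_le_iff (fun w => w.isPrefixOf s) pvKw best p

-- no keyword is the empty string
lemma pvKw_ne_nil : ∀ wp ∈ pvKw, wp.1 ≠ ([] : List Char) := by decide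

-- the nine entries of the keyword table
lemma pvKw_cases : ∀ wp ∈ pvKw,
    wp = ("film".toList, 0) ∨ wp = ("glass".toList, 1) ∨ wp = ("grease".toList, 2) ∨
    wp = ("batter".toList, 3) ∨ wp = ("hid".toList, 3) ∨ wp = ("e waste".toList, 3) ∨
    wp = ("light".toList, 3) ∨ wp = ("tube".toList, 3) ∨ wp = ("bulb".toList, 3) := by
  intro wp hm
  simpa only [pvKw, List.mem_cons, List.not_mem_nil, or_false] using hm

-- unfolding equation for pvScan (definitional)
lemma pvScan_cons (best : Nat) (c : Char) (rest : List Char) :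
    pvScan (c :: rest) best = pvScan rest (pvStep best (c :: rest)) := rfl

-- the scan finds the minimum priority among keywords occurring anywhere (as infix)
lemma pvScan_le_iff (s : List Char) :
    ∀ (best p : Nat), pvScan s best ≤ p ↔ best ≤ p ∨ ∃ wp ∈ pvKw, wp.2 ≤ p ∧ wp.1 <:+: s := by
  induction s with
  | nil =>
    intro best p
    constructor
    · intro h; exact Or.inl h
    · rintro (h | ⟨wp, hm, h1, h2⟩)
      · exact h
      · exact absurd (List.eq_nil_of_infix_nil h2) (pvKw_ne_nil wp hm)
  | cons c rest ih =>
    intro best p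
    rw [pvScan_cons, ih, pvStep_le_iff]
    simp only [List.infix_cons_iff, List.isPrefixOf_iff_prefix, and_or_left, exists_or]
    rw [or_assoc]

-- the scan as the four-way priority cascade over infix tests
def pvCascadeL (s : List Char) : Nat :=
  if "film".toList <:+: s then 0
  else if "glass".toList <:+: s then 1
  else if "grease".toList <:+: s then 2
  else if ∃ w ∈ (["batter", "hid", "e waste", "light", "tube", "bulb"] : List String),
            w.toList <:+: s then 3
  else 4

lemma pvScan_eq_cascade (s : List Char) : pvScan s 4 = pvCascadeL s := by
  have H := pvScan_le_iff s 4
  unfold pvCascadeL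
  split_ifs with h1 h2 h3 h4
  · have hle := (H 0).mpr (Or.inr ⟨("film".toList, 0), by simp [pvKw], le_refl 0, h1⟩)
    omega
  · have hle := (H 1).mpr (Or.inr ⟨("glass".toList, 1), by simp [pvKw], le_refl 1, h2⟩)
    have hgt : ¬ pvScan s 4 ≤ 0 := by
      intro h
      rcases (H 0).mp h with h' | ⟨wp, hm, hp, hinf⟩
      · omega
      · rcases pvKw_cases wp hm with rfl|rfl|rfl|rfl|rfl|rfl|rfl|rfl|rfl <;> simp_all
    omega
  · have hle := (H 2).mpr (Or.inr ⟨("grease".toList, 2), by simp [pvKw], le_refl 2, h3⟩)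
    have hgt : ¬ pvScan s 4 ≤ 1 := by
      intro h
      rcases (H 1).mp h with h' | ⟨wp, hm, hp, hinf⟩
      · omega
      · rcases pvKw_cases wp hm with rfl|rfl|rfl|rfl|rfl|rfl|rfl|rfl|rfl <;> simp_all
    omega
  · obtain ⟨w, hw, hinf⟩ := h4
    have hmem : (w.toList, 3) ∈ pvKw := by
      simp only [List.mem_cons, List.not_mem_nil, or_false] at hw
      rcases hw with rfl | rfl | rfl | rfl | rfl | rfl <;> simp [pvKw]
    have hle := (H 3).mpr (Or.inr ⟨(w.toList, 3), hmem, le_refl 3, hinf⟩)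
    have hgt : ¬ pvScan s 4 ≤ 2 := by
      intro h
      rcases (H 2).mp h with h' | ⟨wp, hm, hp, hinf'⟩
      · omega
      · rcases pvKw_cases wp hm with rfl|rfl|rfl|rfl|rfl|rfl|rfl|rfl|rfl <;> simp_all
    omega
  · have hle := (H 4).mpr (Or.inl (le_refl 4))
    have hgt : ¬ pvScan s 4 ≤ 3 := by
      intro h
      rcases (H 3).mp h with h' | ⟨wp, hm, hp, hinf'⟩
      · omega
      · have hb : ¬ "batter".toList <:+: s := fun hx => h4 ⟨"batter", by simp, hx⟩
        have hh : ¬ "hid".toList <:+: s := fun hx => h4 ⟨"hid", by simp, hx⟩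
        have he : ¬ "e waste".toList <:+: s := fun hx => h4 ⟨"e waste", by simp, hx⟩
        have hl : ¬ "light".toList <:+: s := fun hx => h4 ⟨"light", by simp, hx⟩
        have ht : ¬ "tube".toList <:+: s := fun hx => h4 ⟨"tube", by simp, hx⟩
        have hu : ¬ "bulb".toList <:+: s := fun hx => h4 ⟨"bulb", by simp, hx⟩
        rcases pvKw_cases wp hm with rfl|rfl|rfl|rfl|rfl|rfl|rfl|rfl|rfl <;> simp_all
    omega

-- ===== VERDICT =====
theorem update_mastersheet_material_type_spec : Claim_equal_update_mastersheet_material_type := by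
  intro notes _
  unfold Spec_update_mastersheet_material_type
  cases notes with
  | none => decide
  | some n =>
    by_cases hn : n = ""
    · subst hn; decide
    · have hn' : n ≠ "" := hn
      simp only [update_mastersheet_material_type, update_mastersheet_material_type_alt]
      rw [if_pos hn', if_pos hn', pvScan_eq_cascade]
      unfold pvCascadeL
      simp only [List.any_cons, List.any_nil, Bool.or_eq_true, Bool.or_false,
        PySem.Str.isIn_iff_infix, PySem.Str.toList_lower]
      by_cases h1 : "film".toList <:+: PySem.Chars.lower n.toList
      · rw [if_pos h1, if_pos h1]; decide
      · rw [if_neg h1, if_neg h1]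
        by_cases h2 : "glass".toList <:+: PySem.Chars.lower n.toList
        · rw [if_pos h2, if_pos h2]; decide
        · rw [if_neg h2, if_neg h2]
          by_cases h3 : "grease".toList <:+: PySem.Chars.lower n.toList
          · rw [if_pos h3, if_pos h3]; decide
          · rw [if_neg h3, if_neg h3]
            by_cases h4 : ∃ w ∈ (["batter", "hid", "e waste", "light", "tube", "bulb"] : List String),
                w.toList <:+: PySem.Chars.lower n.toList
            · rw [if_pos ?_, if_pos h4]
              · decide
              · obtain ⟨w, hw, hx⟩ := h4
                simp only [List.mem_cons, List.not_mem_nil, or_false] at hw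
                rcases hw with rfl | rfl | rfl | rfl | rfl | rfl <;> tauto
            · rw [if_neg ?_, if_neg h4]
              · decide
              · intro hcon
                rcases hcon with h | h | h | h | h | h <;>
                  exact h4 ⟨_, by simp, h⟩
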